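-- pv_equiv track=rewrite | github.com/richnakasato/lc | 788.rotated-digits.python3.0.py | helper
-- ===== SOURCE A (Python) =====
-- def helper(n, good, bad):
--     seen_good = False
--     while n:
--         digit = n%10
--         if digit in bad:
--             return False
--         elif digit in good:
--             seen_good = True
--         n//=10
--     return seen_good
-- ===== SOURCE B (Python) =====
-- def helper(n, good, bad):
--     digits = set()
--     while n:
--         digits.add(n % 10)
--         n //= 10
--     if digits & set(bad):
--         return False
--     return bool(digits & set(good))
-- ===== Notes on version B (the rewrite author's own statement) =====
-- stated objective: idiomatic
-- what changed: Replaces A's early-return flag-tracking single pass with a build-then-test decomposition: first collect the digit set arithmetically, then decide by two set intersections (bad first, then good).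
-- outside the precondition, e.g. on helper(-5, set(), {5}): A returns False, B does not finish within the time limit
import Mathlib
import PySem

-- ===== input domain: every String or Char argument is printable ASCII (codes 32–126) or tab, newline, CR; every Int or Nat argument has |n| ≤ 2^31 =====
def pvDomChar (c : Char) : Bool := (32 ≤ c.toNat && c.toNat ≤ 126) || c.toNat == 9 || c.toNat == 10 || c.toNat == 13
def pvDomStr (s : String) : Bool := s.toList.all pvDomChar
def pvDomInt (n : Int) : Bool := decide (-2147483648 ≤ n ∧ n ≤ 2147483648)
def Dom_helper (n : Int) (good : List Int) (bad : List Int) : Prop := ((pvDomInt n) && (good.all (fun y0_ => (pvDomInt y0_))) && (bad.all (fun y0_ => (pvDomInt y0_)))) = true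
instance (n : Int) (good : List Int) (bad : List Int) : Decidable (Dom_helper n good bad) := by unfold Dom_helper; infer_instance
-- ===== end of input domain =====

-- B replaces A's early-return flag-tracking pass by an idiomatic build-then-test decomposition:
-- collect the digit set, then decide by two set intersections (bad first, then good).

-- ===== PORT A =====
-- the 'while n:' loop; for n < 0 Python's n //= 10 stabilises at -1 and never reaches the
-- loop exit, so the n < 0 branch (excluded by Pre_helper) just returns false here.
def helperLoopA (n : Int) (good : List Int) (bad : List Int) (seenGood : Bool) : Bool :=
  if _hz : n = 0 then seenGood
  else
    let digit := PySem.Int.mod n 10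
    if bad.contains digit then false
    else
      let seenGood' := if good.contains digit then true else seenGood
      if hp : 0 < n then helperLoopA (PySem.Int.floordiv n 10) good bad seenGood'
      else false
  termination_by n.toNat
  decreasing_by
    rw [PySem.Int.floordiv_eq_ediv_of_pos (by omega : (0:Int) < 10)]
    omega

def helper (n : Int) (good : List Int) (bad : List Int) : Bool :=
  helperLoopA n good bad false

-- ===== PORT B =====
-- the digit-collecting 'while n:' loop of Source B; same n < 0 caveat as above (Python diverges there)
def digitSetB (n : Int) (acc : PySem.Set Int) : PySem.Set Int :=
  if _hz : n = 0 then acc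
  else if hp : 0 < n then
    digitSetB (PySem.Int.floordiv n 10) (PySem.Set.add acc (PySem.Int.mod n 10))
  else acc
  termination_by n.toNat
  decreasing_by
    rw [PySem.Int.floordiv_eq_ediv_of_pos (by omega : (0:Int) < 10)]
    omega

def helper_alt (n : Int) (good : List Int) (bad : List Int) : Bool :=
  let digits := digitSetB n PySem.Set.empty
  if !(PySem.Set.inter digits (PySem.Set.ofList bad)).isEmpty then false
  else !(PySem.Set.inter digits (PySem.Set.ofList good)).isEmpty

-- ===== PRECONDITION & SPEC =====
-- Pre_ excludes n < 0: there Python's n //= 10 loop never terminates (n stabilises at -1),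
-- so A diverges unless an early digit is in bad (then A returns False) while B always diverges.
def Pre_helper (n : Int) (good : List Int) (bad : List Int) : Prop := 0 ≤ n
instance (n : Int) (good : List Int) (bad : List Int) : Decidable (Pre_helper n good bad) := by unfold Pre_helper; infer_instance
def pvWitness_helper : Int × List Int × List Int := (2159, [2, 5, 6, 9], [3, 4, 7])

def Spec_helper (n : Int) (good : List Int) (bad : List Int) (out : Bool) : Prop := out = helper_alt n good bad
instance (n : Int) (good : List Int) (bad : List Int) (out : Bool) : Decidable (Spec_helper n good bad out) := by unfold Spec_helper; infer_instance

-- ===== CLAIM (what is proved, stated in full; the proofs are below) =====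
def Claim_equal_helper : Prop := ∀ (n : Int) (good : List Int) (bad : List Int), Dom_helper n good bad → Pre_helper n good bad → Spec_helper n good bad (helper n good bad)

-- ===== LEMMAS AND PROOFS =====

-- proof-side list of digits of n (low to high), for 0 ≤ n
def digitsL (n : Int) : List Int :=
  if _hz : n = 0 then []
  else if hp : 0 < n then PySem.Int.mod n 10 :: digitsL (PySem.Int.floordiv n 10)
  else []
  termination_by n.toNat
  decreasing_by
    rw [PySem.Int.floordiv_eq_ediv_of_pos (by omega : (0:Int) < 10)]
    omega

lemma helperLoopA_eq (good bad : List Int) :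
    ∀ (n : Int), 0 ≤ n → ∀ (seen : Bool),
      helperLoopA n good bad seen =
        if (digitsL n).any bad.contains then false
        else seen || (digitsL n).any good.contains := by
  intro n
  induction n using digitsL.induct with
  | case1 =>
      intro _ seen
      rw [helperLoopA, digitsL]
      simp
  | case2 n hz hp ih =>
      intro _ seen
      rw [helperLoopA, digitsL]
      simp only [hz, hp, dite_true, dite_false, List.any_cons,
        ih (by rw [PySem.Int.floordiv_eq_ediv_of_pos (by omega : (0:Int) < 10)]; omega)]
      cases hb : bad.contains (PySem.Int.mod n 10) <;>
        cases hr : (digitsL (PySem.Int.floordiv n 10)).any bad.contains <;>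
        cases hg : good.contains (PySem.Int.mod n 10) <;>
        cases seen <;> simp_all
  | case3 n hz hp =>
      intro hnn
      omega

lemma any_digitSetB (p : Int → Bool) :
    ∀ (n : Int) (acc : PySem.Set Int),
      (digitSetB n acc).any p = (acc.any p || (digitsL n).any p) := by
  intro n
  induction n using digitsL.induct with
  | case1 =>
      intro acc
      rw [digitSetB, digitsL]
      simp
  | case2 n hz hp ih =>
      intro acc
      rw [digitSetB, digitsL]
      simp only [hz, hp, dite_true, dite_false, List.any_cons, ih, PySem.Set.add]
      by_cases hm : PySem.Int.mod n 10 ∈ acc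
      · have hp10 : p (PySem.Int.mod n 10) = true → acc.any p = true :=
          fun hpt => List.any_eq_true.mpr ⟨_, hm, hpt⟩
        cases hpv : p (PySem.Int.mod n 10) <;> simp_all
      · cases hv : acc.any p <;> cases hw : p (PySem.Int.mod n 10) <;> simp_all
  | case3 n hz hp =>
      intro acc
      rw [digitSetB, digitsL]
      simp [hz, hp]

lemma inter_isEmpty_iff (s : PySem.Set Int) (t : List Int) :
    (PySem.Set.inter s (PySem.Set.ofList t)).isEmpty = !(s.any t.contains) := by
  rw [PySem.Set.inter]
  have hpred : (fun x => (PySem.Set.ofList t).contains x) = fun x : Int => decide (x ∈ t) := by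
    funext x; simp [PySem.Set.contains, PySem.Set.mem_ofList]
  rw [hpred]
  induction s with
  | nil => simp
  | cons x xs ih =>
      by_cases hx : x ∈ t <;> simp [hx, ih]

-- ===== VERDICT (by name: the statement is the Claim_ definition above) =====
theorem helper_spec : Claim_equal_helper := by
  intro n good bad _hd _hpre
  unfold Spec_helper helper helper_alt
  rw [helperLoopA_eq good bad n _hpre]
  simp only [inter_isEmpty_iff, any_digitSetB, PySem.Set.empty, List.any_nil,
    Bool.false_or, Bool.not_not]
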